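-- pv_equiv track=rewrite | github.com/danieledge/DataK9 | validation_framework/profiler/correlation_insight_synthesizer.py | _is_tautological_correlation
-- ===== SOURCE A (Python) =====
-- def _is_tautological_correlation(col1: str, col2: str) -> bool:
--     """
--     Check if correlation between columns is tautological (low insight value).
--
--     Examples:
--     - SibSp/Parch: Both count family members, correlation is obvious
--     - Price/Total: If total includes price, correlation is expected
--     - Count/Amount: Often measure same thing
--     """
--     col1_lower = col1.lower()
--     col2_lower = col2.lower()
--
--     # Define groups of semantically related column patterns
--     tautological_groups = [
--         # Family members
--         {'sib', 'spouse', 'parch', 'parent', 'child', 'family', 'relative'},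
--         # Financial amounts
--         {'price', 'total', 'amount', 'cost', 'sum', 'value'},
--         # Counts
--         {'count', 'num', 'qty', 'quantity'},
--     ]
--
--     for group in tautological_groups:
--         col1_matches = any(pat in col1_lower for pat in group)
--         col2_matches = any(pat in col2_lower for pat in group)
--         if col1_matches and col2_matches:
--             return True
--
--     return False
-- ===== SOURCE B (Python) =====
-- _PATTERN_TO_GROUP = {
--     'sib': 0, 'spouse': 0, 'parch': 0, 'parent': 0, 'child': 0,
--     'family': 0, 'relative': 0,
--     'price': 1, 'total': 1, 'amount': 1, 'cost': 1, 'sum': 1, 'value': 1,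
--     'count': 2, 'num': 2, 'qty': 2, 'quantity': 2,
-- }
-- _PATTERN_LENGTHS = [3, 4, 5, 6, 8]  # the distinct pattern lengths
--
--
-- def _groups_matched(col):
--     """Slide a window over the lowered column and hash-look-up every window
--     of a pattern length, collecting the indices of the groups hit."""
--     s = col.lower()
--     groups = set()
--     for i in range(len(s)):
--         for length in _PATTERN_LENGTHS:
--             group = _PATTERN_TO_GROUP.get(s[i:i + length])
--             if group is not None:
--                 groups.add(group)
--     return groups
--
--
-- def _is_tautological_correlation(col1, col2):
--     """Check if correlation between columns is tautological (low insight value)."""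
--     return not _groups_matched(col1).isdisjoint(_groups_matched(col2))
-- ===== Notes on version B (the rewrite author's own statement) =====
-- stated objective: alternative
-- what changed: Instead of testing every pattern for containment in both columns group by group, B slides a window over each lowered column, hash-looks-up every window of a pattern length in a flat pattern-to-group dict to collect the group indices each column hits, and decides by set disjointness.
import Mathlib
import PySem

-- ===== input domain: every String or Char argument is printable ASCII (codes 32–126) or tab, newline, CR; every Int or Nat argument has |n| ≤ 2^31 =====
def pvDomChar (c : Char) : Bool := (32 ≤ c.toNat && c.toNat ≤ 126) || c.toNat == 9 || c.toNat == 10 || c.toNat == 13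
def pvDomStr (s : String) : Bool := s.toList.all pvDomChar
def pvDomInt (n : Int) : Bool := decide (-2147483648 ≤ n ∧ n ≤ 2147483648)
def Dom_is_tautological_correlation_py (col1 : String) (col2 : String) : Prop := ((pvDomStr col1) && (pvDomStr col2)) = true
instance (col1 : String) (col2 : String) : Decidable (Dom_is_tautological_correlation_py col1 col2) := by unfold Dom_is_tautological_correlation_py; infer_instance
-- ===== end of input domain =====

-- B replaces A's per-group containment scans (every pattern tested against both columns)
-- by a sliding window over each lowered column: every window of a pattern length is looked
-- up in one flat pattern→group dict, collecting each column's set of group indices, and the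
-- answer is the disjointness test of the two sets (alternative decomposition, similar cost).

-- ===== PORT A =====
-- the tautological_groups literal (a set of string patterns per group; membership order only feeds `any`)
def pvGroupsA : List (List String) :=
  [["sib", "spouse", "parch", "parent", "child", "family", "relative"],
   ["price", "total", "amount", "cost", "sum", "value"],
   ["count", "num", "qty", "quantity"]]

-- the `for group in tautological_groups` loop: check both columns per group, return True early
def pvLoopA (c1 : String) (c2 : String) : List (List String) → Bool
  | [] => false
  | g :: rest =>
    let col1_matches := g.any (fun pat => PySem.Str.isIn pat c1)
    let col2_matches := g.any (fun pat => PySem.Str.isIn pat c2)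
    if col1_matches && col2_matches then true else pvLoopA c1 c2 rest

def is_tautological_correlation_py (col1 : String) (col2 : String) : Bool :=
  pvLoopA (PySem.Str.lower col1) (PySem.Str.lower col2) pvGroupsA

-- ===== PORT B =====
-- the flat _PATTERN_TO_GROUP dict literal
def pvPatternToGroup : PySem.Dict String Int :=
  PySem.Dict.ofList
    [("sib", 0), ("spouse", 0), ("parch", 0), ("parent", 0), ("child", 0),
     ("family", 0), ("relative", 0),
     ("price", 1), ("total", 1), ("amount", 1), ("cost", 1), ("sum", 1), ("value", 1),
     ("count", 2), ("num", 2), ("qty", 2), ("quantity", 2)]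

-- _PATTERN_LENGTHS = [3, 4, 5, 6, 8]
def pvPatternLengths : List Int := [3, 4, 5, 6, 8]

-- the inner `for length in _PATTERN_LENGTHS` loop body: look the window up, add the hit
def pvScanLens (s : String) (i : Int) (groups : PySem.Set Int) : PySem.Set Int :=
  pvPatternLengths.foldl (fun groups length =>
    match PySem.Dict.get? pvPatternToGroup (PySem.Str.slice s (some i) (some (i + length))) with
    | some group => PySem.Set.add groups group
    | none => groups) groups

-- _groups_matched: slide over range(len(s)) collecting group indices
def pvGroupsMatched (col : String) : PySem.Set Int :=
  let s := PySem.Str.lower col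
  (PySem.List.pyRange 0 (PySem.Str.len s) 1).foldl
    (fun groups i => pvScanLens s i groups) PySem.Set.empty

def is_tautological_correlation_py_alt (col1 : String) (col2 : String) : Bool :=
  !(PySem.Set.isdisjoint (pvGroupsMatched col1) (pvGroupsMatched col2))

-- ===== PRECONDITION & SPEC =====
def Spec_is_tautological_correlation_py (col1 : String) (col2 : String) (out : Bool) : Prop := out = is_tautological_correlation_py_alt col1 col2
instance (col1 : String) (col2 : String) (out : Bool) : Decidable (Spec_is_tautological_correlation_py col1 col2 out) := by unfold Spec_is_tautological_correlation_py; infer_instance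

-- ===== CLAIM (what is proved, stated in full; the proofs are below) =====
def Claim_equal_is_tautological_correlation_py : Prop := ∀ (col1 : String) (col2 : String), Dom_is_tautological_correlation_py col1 col2 → Spec_is_tautological_correlation_py col1 col2 (is_tautological_correlation_py col1 col2)

-- ===== LEMMAS AND PROOFS =====

-- membership through a fold that conditionally adds a looked-up value
theorem pv_mem_foldl_condAdd (f : Int → Option Int) (l : List Int) (acc : PySem.Set Int) (g : Int) :
    g ∈ l.foldl (fun gs L => match f L with | some x => PySem.Set.add gs x | none => gs) acc ↔
      g ∈ acc ∨ ∃ L ∈ l, f L = some g := by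
  induction l generalizing acc with
  | nil => simp
  | cons L rest ih =>
    simp only [List.foldl_cons]
    cases hf : f L with
    | none =>
      rw [ih]
      simp only [List.mem_cons]
      constructor
      · rintro (h | ⟨L', hL', h⟩)
        · exact Or.inl h
        · exact Or.inr ⟨L', Or.inr hL', h⟩
      · rintro (h | ⟨L', (rfl | hL'), h⟩)
        · exact Or.inl h
        · rw [hf] at h; cases h
        · exact Or.inr ⟨L', hL', h⟩
    | some x =>
      rw [ih]
      simp only [List.mem_cons, PySem.Set.mem_add]
      constructor
      · rintro ((h | rfl) | ⟨L', hL', h⟩)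
        · exact Or.inl h
        · exact Or.inr ⟨L, Or.inl rfl, hf⟩
        · exact Or.inr ⟨L', Or.inr hL', h⟩
      · rintro (h | ⟨L', (rfl | hL'), h⟩)
        · exact Or.inl (Or.inl h)
        · rw [hf] at h; exact Or.inl (Or.inr (Option.some_injective _ h).symm)
        · exact Or.inr ⟨L', hL', h⟩

theorem pv_mem_scanLens (s : String) (i : Int) (acc : PySem.Set Int) (g : Int) :
    g ∈ pvScanLens s i acc ↔
      g ∈ acc ∨ ∃ L ∈ pvPatternLengths,
        PySem.Dict.get? pvPatternToGroup (PySem.Str.slice s (some i) (some (i + L))) = some g := by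
  exact pv_mem_foldl_condAdd _ _ acc g

theorem pv_mem_outer (s : String) (l : List Int) (acc : PySem.Set Int) (g : Int) :
    g ∈ l.foldl (fun gs i => pvScanLens s i gs) acc ↔
      g ∈ acc ∨ ∃ i ∈ l, ∃ L ∈ pvPatternLengths,
        PySem.Dict.get? pvPatternToGroup (PySem.Str.slice s (some i) (some (i + L))) = some g := by
  induction l generalizing acc with
  | nil => simp
  | cons i rest ih =>
    simp only [List.foldl_cons]
    rw [ih]
    simp only [pv_mem_scanLens, List.mem_cons]
    constructor
    · rintro ((h | ⟨L, hL, h⟩) | ⟨i', hi', h⟩)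
      · exact Or.inl h
      · exact Or.inr ⟨i, Or.inl rfl, L, hL, h⟩
      · exact Or.inr ⟨i', Or.inr hi', h⟩
    · rintro (h | ⟨i', (rfl | hi'), h⟩)
      · exact Or.inl (Or.inl h)
      · exact Or.inl (Or.inr h)
      · exact Or.inr ⟨i', hi', h⟩

-- get? on the flat pattern dict, characterised as "q is a pattern of group g"
set_option maxHeartbeats 2000000 in
theorem pv_get?_patMap (q : String) (g : Int) :
    PySem.Dict.get? pvPatternToGroup q = some g ↔
      (g = 0 ∧ q ∈ (["sib", "spouse", "parch", "parent", "child", "family", "relative"] : List String)) ∨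
      (g = 1 ∧ q ∈ (["price", "total", "amount", "cost", "sum", "value"] : List String)) ∨
      (g = 2 ∧ q ∈ (["count", "num", "qty", "quantity"] : List String)) := by
  have h : pvPatternToGroup = PySem.Dict.mk
    [("sib", 0), ("spouse", 0), ("parch", 0), ("parent", 0), ("child", 0),
     ("family", 0), ("relative", 0),
     ("price", 1), ("total", 1), ("amount", 1), ("cost", 1), ("sum", 1), ("value", 1),
     ("count", 2), ("num", 2), ("qty", 2), ("quantity", 2)] := by rfl
  rw [h]
  simp only [List.mem_cons, List.not_mem_nil, or_false]
  rw [PySem.Dict.get?_mk_cons]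
  cases hb0 : ("sib" == q) with
  | true => cases (eq_of_beq hb0); simp; omega
  | false =>
    rw [PySem.Dict.get?_mk_cons]
    cases hb1 : ("spouse" == q) with
    | true => cases (eq_of_beq hb1); simp; omega
    | false =>
      rw [PySem.Dict.get?_mk_cons]
      cases hb2 : ("parch" == q) with
      | true => cases (eq_of_beq hb2); simp; omega
      | false =>
        rw [PySem.Dict.get?_mk_cons]
        cases hb3 : ("parent" == q) with
        | true => cases (eq_of_beq hb3); simp; omega
        | false =>
          rw [PySem.Dict.get?_mk_cons]
          cases hb4 : ("child" == q) with
          | true => cases (eq_of_beq hb4); simp; omega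
          | false =>
            rw [PySem.Dict.get?_mk_cons]
            cases hb5 : ("family" == q) with
            | true => cases (eq_of_beq hb5); simp; omega
            | false =>
              rw [PySem.Dict.get?_mk_cons]
              cases hb6 : ("relative" == q) with
              | true => cases (eq_of_beq hb6); simp; omega
              | false =>
                rw [PySem.Dict.get?_mk_cons]
                cases hb7 : ("price" == q) with
                | true => cases (eq_of_beq hb7); simp; omega
                | false =>
                  rw [PySem.Dict.get?_mk_cons]
                  cases hb8 : ("total" == q) with
                  | true => cases (eq_of_beq hb8); simp; omega
                  | false =>
                    rw [PySem.Dict.get?_mk_cons]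
                    cases hb9 : ("amount" == q) with
                    | true => cases (eq_of_beq hb9); simp; omega
                    | false =>
                      rw [PySem.Dict.get?_mk_cons]
                      cases hb10 : ("cost" == q) with
                      | true => cases (eq_of_beq hb10); simp; omega
                      | false =>
                        rw [PySem.Dict.get?_mk_cons]
                        cases hb11 : ("sum" == q) with
                        | true => cases (eq_of_beq hb11); simp; omega
                        | false =>
                          rw [PySem.Dict.get?_mk_cons]
                          cases hb12 : ("value" == q) with
                          | true => cases (eq_of_beq hb12); simp; omega
                          | false =>
                            rw [PySem.Dict.get?_mk_cons]
                            cases hb13 : ("count" == q) with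
                            | true => cases (eq_of_beq hb13); simp; omega
                            | false =>
                              rw [PySem.Dict.get?_mk_cons]
                              cases hb14 : ("num" == q) with
                              | true => cases (eq_of_beq hb14); simp; omega
                              | false =>
                                rw [PySem.Dict.get?_mk_cons]
                                cases hb15 : ("qty" == q) with
                                | true => cases (eq_of_beq hb15); simp; omega
                                | false =>
                                  rw [PySem.Dict.get?_mk_cons]
                                  cases hb16 : ("quantity" == q) with
                                  | true => cases (eq_of_beq hb16); simp; omega
                                  | false =>
                                    have n0 : q ≠ "sib" := fun h => by subst h; simp at hb0
                                    have n1 : q ≠ "spouse" := fun h => by subst h; simp at hb1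
                                    have n2 : q ≠ "parch" := fun h => by subst h; simp at hb2
                                    have n3 : q ≠ "parent" := fun h => by subst h; simp at hb3
                                    have n4 : q ≠ "child" := fun h => by subst h; simp at hb4
                                    have n5 : q ≠ "family" := fun h => by subst h; simp at hb5
                                    have n6 : q ≠ "relative" := fun h => by subst h; simp at hb6
                                    have n7 : q ≠ "price" := fun h => by subst h; simp at hb7
                                    have n8 : q ≠ "total" := fun h => by subst h; simp at hb8
                                    have n9 : q ≠ "amount" := fun h => by subst h; simp at hb9
                                    have n10 : q ≠ "cost" := fun h => by subst h; simp at hb10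
                                    have n11 : q ≠ "sum" := fun h => by subst h; simp at hb11
                                    have n12 : q ≠ "value" := fun h => by subst h; simp at hb12
                                    have n13 : q ≠ "count" := fun h => by subst h; simp at hb13
                                    have n14 : q ≠ "num" := fun h => by subst h; simp at hb14
                                    have n15 : q ≠ "qty" := fun h => by subst h; simp at hb15
                                    have n16 : q ≠ "quantity" := fun h => by subst h; simp at hb16
                                    simp [PySem.Dict.get?, n0, n1, n2, n3, n4, n5, n6, n7, n8, n9, n10, n11, n12, n13, n14, n15, n16]

-- a window of a pattern's length matches the pattern somewhere iff the pattern is a substring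
theorem pv_window_iff (s : String) (pat : String) (hn : pat.toList ≠ [])
    (hlen : ((pat.toList.length : Int)) ∈ pvPatternLengths) :
    (∃ i ∈ PySem.List.pyRange 0 (PySem.Str.len s) 1, ∃ L ∈ pvPatternLengths,
        PySem.Str.slice s (some i) (some (i + L)) = pat) ↔
      PySem.Str.isIn pat s = true := by
  constructor
  · rintro ⟨i, hi, L, hL, heq⟩
    rw [PySem.List.mem_pyRange_one] at hi
    have hL0 : 0 ≤ L := by
      simp [pvPatternLengths] at hL
      rcases hL with rfl | rfl | rfl | rfl | rfl <;> norm_num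
    have ht := congrArg String.toList heq
    rw [show PySem.Str.isIn pat s = PySem.Chars.isIn pat.toList s.toList from by simp]
    rw [← PySem.Chars.exists_prefix_drop_iff_isIn]
    refine ⟨i.toNat, ?_⟩
    have hslice : (PySem.Str.slice s (some i) (some (i + L))).toList
        = (s.toList.drop i.toNat).take ((i + L).toNat - i.toNat) := by
      have := PySem.List.slice_toNat (xs := s.toList) (a := i) (b := i + L) hi.1 (by omega)
      simp [← this]
    rw [hslice] at ht
    rw [← ht]
    exact List.take_prefix _ _
  · intro hin
    rw [show PySem.Str.isIn pat s = PySem.Chars.isIn pat.toList s.toList from by simp] at hin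
    rw [← PySem.Chars.exists_prefix_drop_iff_isIn] at hin
    obtain ⟨j, hj⟩ := hin
    have hjlt : j < s.toList.length := by
      by_contra hge
      push_neg at hge
      rw [List.drop_eq_nil_of_le hge] at hj
      exact hn (List.prefix_nil.mp hj)
    refine ⟨(j : Int), ?_, (pat.toList.length : Int), hlen, ?_⟩
    · rw [PySem.List.mem_pyRange_one]
      have : PySem.Str.len s = (s.toList.length : Int) := by simp
      constructor
      · positivity
      · omega
    · apply String.toList_inj.mp
      have hslice : (PySem.Str.slice s (some (j:Int)) (some ((j:Int) + (pat.toList.length : Int)))).toList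
          = (s.toList.drop j).take pat.toList.length := by
        have := PySem.List.slice_natCast_add (xs := s.toList) (j := j) (n := pat.toList.length)
        simpa using this
      rw [hslice]
      exact (List.prefix_iff_eq_take.mp hj).symm

-- lift pv_window_iff to a whole group of patterns
theorem pv_group_iff (s : String) (G : List String)
    (hG : ∀ pat ∈ G, pat.toList ≠ [] ∧ ((pat.toList.length : Int)) ∈ pvPatternLengths) :
    (∃ i ∈ PySem.List.pyRange 0 (PySem.Str.len s) 1, ∃ L ∈ pvPatternLengths,
        PySem.Str.slice s (some i) (some (i + L)) ∈ G) ↔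
      G.any (fun pat => PySem.Str.isIn pat s) = true := by
  rw [List.any_eq_true]
  constructor
  · rintro ⟨i, hi, L, hL, hmem⟩
    refine ⟨_, hmem, ?_⟩
    exact (pv_window_iff s _ (hG _ hmem).1 (hG _ hmem).2).mp ⟨i, hi, L, hL, rfl⟩
  · rintro ⟨pat, hp, hin⟩
    obtain ⟨i, hi, L, hL, heq⟩ := (pv_window_iff s pat (hG pat hp).1 (hG pat hp).2).mpr hin
    exact ⟨i, hi, L, hL, heq ▸ hp⟩

-- the set _groups_matched(col), characterised by A's three `any` tests
theorem pv_mem_groupsMatched (col : String) (g : Int) :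
    g ∈ pvGroupsMatched col ↔
      (g = 0 ∧ (["sib", "spouse", "parch", "parent", "child", "family", "relative"] : List String).any
          (fun pat => PySem.Str.isIn pat (PySem.Str.lower col)) = true) ∨
      (g = 1 ∧ (["price", "total", "amount", "cost", "sum", "value"] : List String).any
          (fun pat => PySem.Str.isIn pat (PySem.Str.lower col)) = true) ∨
      (g = 2 ∧ (["count", "num", "qty", "quantity"] : List String).any
          (fun pat => PySem.Str.isIn pat (PySem.Str.lower col)) = true) := by
  unfold pvGroupsMatched
  rw [pv_mem_outer]
  simp only [PySem.Set.empty, List.not_mem_nil, false_or, pv_get?_patMap]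
  constructor
  · rintro ⟨i, hi, L, hL, (⟨rfl, hm⟩ | ⟨rfl, hm⟩ | ⟨rfl, hm⟩)⟩
    · exact Or.inl ⟨rfl, (pv_group_iff _ _ (by decide)).mp ⟨i, hi, L, hL, hm⟩⟩
    · exact Or.inr (Or.inl ⟨rfl, (pv_group_iff _ _ (by decide)).mp ⟨i, hi, L, hL, hm⟩⟩)
    · exact Or.inr (Or.inr ⟨rfl, (pv_group_iff _ _ (by decide)).mp ⟨i, hi, L, hL, hm⟩⟩)
  · rintro (⟨rfl, hany⟩ | ⟨rfl, hany⟩ | ⟨rfl, hany⟩)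
    · obtain ⟨i, hi, L, hL, hm⟩ := (pv_group_iff _ _ (by decide)).mpr hany
      exact ⟨i, hi, L, hL, Or.inl ⟨rfl, hm⟩⟩
    · obtain ⟨i, hi, L, hL, hm⟩ := (pv_group_iff _ _ (by decide)).mpr hany
      exact ⟨i, hi, L, hL, Or.inr (Or.inl ⟨rfl, hm⟩)⟩
    · obtain ⟨i, hi, L, hL, hm⟩ := (pv_group_iff _ _ (by decide)).mpr hany
      exact ⟨i, hi, L, hL, Or.inr (Or.inr ⟨rfl, hm⟩)⟩

-- B's disjointness test, as an existential
theorem pv_not_isdisjoint_iff (s t : PySem.Set Int) :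
    (!PySem.Set.isdisjoint s t) = true ↔ ∃ x ∈ s, x ∈ t := by
  rw [Bool.not_eq_true']
  rw [← Bool.not_eq_true]
  rw [PySem.Set.isdisjoint_iff]
  push_neg
  simp

-- ===== VERDICT (by name: the statement is the Claim_ definition above) =====
theorem is_tautological_correlation_py_spec : Claim_equal_is_tautological_correlation_py := by
  unfold Claim_equal_is_tautological_correlation_py
  intro col1 col2 _
  unfold Spec_is_tautological_correlation_py
  rw [Bool.eq_iff_iff]
  unfold is_tautological_correlation_py is_tautological_correlation_py_alt pvGroupsA
  rw [pv_not_isdisjoint_iff]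
  simp only [pvLoopA, Bool.and_eq_true]
  constructor
  · intro hA
    split_ifs at hA with h1 h2 h3
    · exact ⟨0, (pv_mem_groupsMatched col1 0).mpr (Or.inl ⟨rfl, h1.1⟩),
              (pv_mem_groupsMatched col2 0).mpr (Or.inl ⟨rfl, h1.2⟩)⟩
    · exact ⟨1, (pv_mem_groupsMatched col1 1).mpr (Or.inr (Or.inl ⟨rfl, h2.1⟩)),
              (pv_mem_groupsMatched col2 1).mpr (Or.inr (Or.inl ⟨rfl, h2.2⟩))⟩
    · exact ⟨2, (pv_mem_groupsMatched col1 2).mpr (Or.inr (Or.inr ⟨rfl, h3.1⟩)),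
              (pv_mem_groupsMatched col2 2).mpr (Or.inr (Or.inr ⟨rfl, h3.2⟩))⟩
  · rintro ⟨g, hg1, hg2⟩
    rw [pv_mem_groupsMatched] at hg1 hg2
    rcases hg1 with ⟨rfl, ha⟩ | ⟨rfl, ha⟩ | ⟨rfl, ha⟩ <;>
      rcases hg2 with ⟨hg, hb⟩ | ⟨hg, hb⟩ | ⟨hg, hb⟩ <;>
      first
        | omega
        | · simp only [ha, hb]
            split_ifs <;> simp_all
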